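-- pv_equiv track=rewrite | github.com/Mykh-Ai/aitrader | backtester/robustness.py | _combine_final_status
-- ===== SOURCE A (Python) =====
-- from typing import Mapping
--
-- SUB_STATUSES = ("ROBUST", "UNSTABLE", "FRAGILE", "NOT_EVALUATED")
--
-- CRITICAL_CHECKS = ("oos", "walkforward", "regime")
--
-- MAX_CRITICAL_NOT_EVALUATED_FOR_ROBUST = 1
--
-- class RobustnessContractError(ValueError):
--     """Raised when robustness input/output contract checks fail."""
--
-- def _require_sub_status(value: str) -> None:
--     if value not in SUB_STATUSES:
--         raise RobustnessContractError(f"Invalid robustness sub-status: {value}")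
--
-- def _combine_final_status(status_by_check: Mapping[str, str]) -> str:
--     for status in status_by_check.values():
--         _require_sub_status(status)
--
--     critical_not_evaluated = sum(status_by_check.get(check) == "NOT_EVALUATED" for check in CRITICAL_CHECKS)
--     evaluated = [s for s in status_by_check.values() if s != "NOT_EVALUATED"]
--     if not evaluated:
--         return "UNSTABLE"
--     if any(s == "FRAGILE" for s in evaluated):
--         return "FRAGILE"
--     if any(s == "UNSTABLE" for s in evaluated):
--         return "UNSTABLE"
--     if critical_not_evaluated > MAX_CRITICAL_NOT_EVALUATED_FOR_ROBUST:
--         return "UNSTABLE"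
--     return "ROBUST"
-- ===== SOURCE B (Python) =====
-- SUB_STATUSES = ("ROBUST", "UNSTABLE", "FRAGILE", "NOT_EVALUATED")
--
-- CRITICAL_CHECKS = ("oos", "walkforward", "regime")
--
-- MAX_CRITICAL_NOT_EVALUATED_FOR_ROBUST = 1
--
--
-- class RobustnessContractError(ValueError):
--     """Raised when robustness input/output contract checks fail."""
--
--
-- _SEVERITY = {"ROBUST": 0, "UNSTABLE": 1, "FRAGILE": 2}
--
--
-- def _combine_final_status(status_by_check):
--     # Single pass: track the worst severity among evaluated statuses
--     # (-1 = nothing evaluated), then map the result back to a status.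
--     worst = -1
--     for status in status_by_check.values():
--         if status not in SUB_STATUSES:
--             raise RobustnessContractError(f"Invalid robustness sub-status: {status}")
--         if status != "NOT_EVALUATED":
--             worst = max(worst, _SEVERITY[status])
--     if worst == 2:
--         return "FRAGILE"
--     if worst == 1:
--         return "UNSTABLE"
--     if worst < 0:
--         return "UNSTABLE"
--     critical_not_evaluated = sum(
--         status_by_check.get(check) == "NOT_EVALUATED" for check in CRITICAL_CHECKS
--     )
--     return "UNSTABLE" if critical_not_evaluated > MAX_CRITICAL_NOT_EVALUATED_FOR_ROBUST else "ROBUST"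
-- ===== Notes on version B (the rewrite author's own statement) =====
-- stated objective: simpler
-- what changed: Replaces A's filter plus two sequential any() scans over the evaluated list with a single pass that folds the statuses to one worst-severity integer (-1 = nothing evaluated) and maps that back to the final status; the critical count is only computed when the worst severity is ROBUST.
import Mathlib
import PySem

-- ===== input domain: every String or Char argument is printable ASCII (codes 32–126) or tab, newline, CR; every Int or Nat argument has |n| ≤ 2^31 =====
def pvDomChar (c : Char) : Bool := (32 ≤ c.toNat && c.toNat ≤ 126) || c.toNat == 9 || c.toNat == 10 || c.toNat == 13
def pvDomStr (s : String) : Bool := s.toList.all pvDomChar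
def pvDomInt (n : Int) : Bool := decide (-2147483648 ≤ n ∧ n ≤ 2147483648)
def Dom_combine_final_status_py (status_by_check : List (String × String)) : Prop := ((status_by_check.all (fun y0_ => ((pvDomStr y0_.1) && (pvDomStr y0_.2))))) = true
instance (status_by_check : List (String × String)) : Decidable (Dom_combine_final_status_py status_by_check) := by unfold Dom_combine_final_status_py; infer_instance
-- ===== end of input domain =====

-- B changes the decomposition: one worst-severity fold instead of A's filter + two any() scans (objective: simpler).
-- The validation loop of the Python only raises; inputs on which it raises are excluded by Pre_ below.

-- ===== PORT A =====
-- critical_not_evaluated = sum(status_by_check.get(check) == "NOT_EVALUATED" for check in CRITICAL_CHECKS)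
def pvCriticalCount (d : PySem.Dict String String) : Int :=
  (["oos", "walkforward", "regime"]).foldl
    (fun n c => n + (if d.get? c == some "NOT_EVALUATED" then 1 else 0)) 0

def combine_final_status_py (status_by_check : List (String × String)) : String :=
  let d := PySem.Dict.ofList status_by_check
  let critical_not_evaluated := pvCriticalCount d
  let evaluated := d.values.filter (fun s => s != "NOT_EVALUATED")
  if evaluated = [] then "UNSTABLE"
  else if evaluated.any (fun s => s == "FRAGILE") then "FRAGILE"
  else if evaluated.any (fun s => s == "UNSTABLE") then "UNSTABLE"
  else if critical_not_evaluated > 1 then "UNSTABLE"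
  else "ROBUST"

-- ===== PORT B =====
-- _SEVERITY[status] for a valid status (Source B's dict lookup rendered as an if-chain; exact on SUB_STATUSES)
def pvSeverity (s : String) : Int :=
  if s = "FRAGILE" then 2 else if s = "UNSTABLE" then 1 else 0

def combine_final_status_py_alt (status_by_check : List (String × String)) : String :=
  let d := PySem.Dict.ofList status_by_check
  let worst := d.values.foldl
    (fun w s => if s != "NOT_EVALUATED" then max w (pvSeverity s) else w) (-1 : Int)
  if worst = 2 then "FRAGILE"
  else if worst = 1 then "UNSTABLE"
  else if worst < 0 then "UNSTABLE"
  else if pvCriticalCount (PySem.Dict.ofList status_by_check) > 1 then "UNSTABLE"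
  else "ROBUST"

-- ===== PRECONDITION & SPEC =====
-- Pre_ excludes exactly the inputs where the Python raises RobustnessContractError:
-- some value of the dict is not one of the four SUB_STATUSES.
def Pre_combine_final_status_py (status_by_check : List (String × String)) : Prop :=
  ((PySem.Dict.ofList status_by_check).values.all
    (fun s => s == "ROBUST" || s == "UNSTABLE" || s == "FRAGILE" || s == "NOT_EVALUATED")) = true
instance (status_by_check : List (String × String)) : Decidable (Pre_combine_final_status_py status_by_check) := by unfold Pre_combine_final_status_py; infer_instance

def pvWitness_combine_final_status_py : (List (String × String)) :=
  [("oos", "ROBUST"), ("walkforward", "NOT_EVALUATED")]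

def Spec_combine_final_status_py (status_by_check : List (String × String)) (out : String) : Prop := out = combine_final_status_py_alt status_by_check
instance (status_by_check : List (String × String)) (out : String) : Decidable (Spec_combine_final_status_py status_by_check out) := by unfold Spec_combine_final_status_py; infer_instance

-- ===== CLAIM (what is proved, stated in full; the proofs are below) =====
def Claim_equal_combine_final_status_py : Prop := ∀ (status_by_check : List (String × String)), Dom_combine_final_status_py status_by_check → Pre_combine_final_status_py status_by_check → Spec_combine_final_status_py status_by_check (combine_final_status_py status_by_check)

-- ===== LEMMAS AND PROOFS =====

-- closed recursion computing the same worst severity as B's fold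
def pvBest : List String → Int
  | [] => -1
  | s :: t => if s != "NOT_EVALUATED" then max (pvSeverity s) (pvBest t) else pvBest t

theorem pvBest_le (vs : List String) : pvBest vs ≤ 2 := by
  induction vs with
  | nil => simp [pvBest]
  | cons s t ih =>
    simp only [pvBest, pvSeverity]
    split_ifs <;> omega

theorem pvBest_foldl (vs : List String) : ∀ (w : Int), -1 ≤ w →
    vs.foldl (fun w s => if s != "NOT_EVALUATED" then max w (pvSeverity s) else w) w
      = max w (pvBest vs) := by
  induction vs with
  | nil => intro w hw; simp [pvBest]; omega
  | cons s t ih =>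
    intro w hw
    rw [List.foldl_cons]
    by_cases h : s = "NOT_EVALUATED"
    · have hs : (if (s != "NOT_EVALUATED") = true then max w (pvSeverity s) else w) = w := by
        simp [h]
      rw [hs, ih w hw]
      simp [pvBest, h]
    · have hs : (if (s != "NOT_EVALUATED") = true then max w (pvSeverity s) else w)
          = max w (pvSeverity s) := by simp [h]
      rw [hs, ih _ (le_trans hw (le_max_left _ _))]
      simp [pvBest, h, max_assoc]

theorem pvBest_eq (vs : List String) :
    pvBest vs =
      if "FRAGILE" ∈ vs then 2
      else if "UNSTABLE" ∈ vs then 1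
      else if vs.any (fun s => s != "NOT_EVALUATED") then 0
      else -1 := by
  induction vs with
  | nil => simp [pvBest]
  | cons s t ih =>
    have hle := pvBest_le t
    by_cases hf : s = "FRAGILE"
    · subst hf
      simp only [pvBest, ih, pvSeverity]
      simp only [List.mem_cons, true_or, if_true]
      split_ifs <;> simp_all
    · by_cases hu : s = "UNSTABLE"
      · subst hu
        simp only [pvBest, ih, pvSeverity]
        simp [List.mem_cons, Ne.symm hf]
        split_ifs <;> simp_all
      · by_cases hn : s = "NOT_EVALUATED"
        · subst hn
          simp only [pvBest, ih]
          simp [List.mem_cons, List.any_cons]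
        · simp only [pvBest, ih, pvSeverity]
          simp [List.mem_cons, List.any_cons, hf, hu, hn, Ne.symm hf, Ne.symm hu]
          split_ifs <;> simp_all

-- ===== VERDICT (by name: the statement is the Claim_ definition above) =====
theorem combine_final_status_py_spec : Claim_equal_combine_final_status_py := by
  intro sbc _ _
  unfold Spec_combine_final_status_py combine_final_status_py combine_final_status_py_alt
  dsimp only
  rw [pvBest_foldl _ (-1) (le_refl _), pvBest_eq]
  set vs := (PySem.Dict.ofList sbc).values with hvs
  by_cases hf : "FRAGILE" ∈ vs
  · have h1 : vs.filter (fun s => s != "NOT_EVALUATED") ≠ [] := by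
      simp only [ne_eq, List.filter_eq_nil_iff, not_forall]
      exact ⟨"FRAGILE", hf, by simp⟩
    have h2 : (vs.filter (fun s => s != "NOT_EVALUATED")).any (fun s => s == "FRAGILE") = true := by
      simp only [List.any_eq_true, List.mem_filter]
      exact ⟨"FRAGILE", ⟨hf, by simp⟩, by simp⟩
    simp [hf, h1, h2]
  · by_cases hu : "UNSTABLE" ∈ vs
    · have h1 : vs.filter (fun s => s != "NOT_EVALUATED") ≠ [] := by
        simp only [ne_eq, List.filter_eq_nil_iff, not_forall]
        exact ⟨"UNSTABLE", hu, by simp⟩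
      have h2 : (vs.filter (fun s => s != "NOT_EVALUATED")).any (fun s => s == "FRAGILE") = false := by
        simp only [List.any_eq_false, List.mem_filter]
        rintro x ⟨hx, -⟩ hxe
        have hxf : x = "FRAGILE" := by simpa using hxe
        exact hf (hxf ▸ hx)
      have h3 : (vs.filter (fun s => s != "NOT_EVALUATED")).any (fun s => s == "UNSTABLE") = true := by
        simp only [List.any_eq_true, List.mem_filter]
        exact ⟨"UNSTABLE", ⟨hu, by simp⟩, by simp⟩
      simp [hf, hu, h1, h2, h3]
    · by_cases he : vs.any (fun s => s != "NOT_EVALUATED") = true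
      · have h1 : vs.filter (fun s => s != "NOT_EVALUATED") ≠ [] := by
          simp only [List.any_eq_true] at he
          obtain ⟨x, hx, hxe⟩ := he
          simp only [ne_eq, List.filter_eq_nil_iff, not_forall]
          exact ⟨x, hx, by simpa using hxe⟩
        have h2 : (vs.filter (fun s => s != "NOT_EVALUATED")).any (fun s => s == "FRAGILE") = false := by
          simp only [List.any_eq_false, List.mem_filter]
          rintro x ⟨hx, -⟩ hxe
          have hxf : x = "FRAGILE" := by simpa using hxe
          exact hf (hxf ▸ hx)
        have h3 : (vs.filter (fun s => s != "NOT_EVALUATED")).any (fun s => s == "UNSTABLE") = false := by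
          simp only [List.any_eq_false, List.mem_filter]
          rintro x ⟨hx, -⟩ hxe
          have hxu : x = "UNSTABLE" := by simpa using hxe
          exact hu (hxu ▸ hx)
        simp [hf, hu, he, h1, h2, h3]
      · have he' : ∀ x, ¬(x ∈ vs ∧ (x != "NOT_EVALUATED") = true) := by
          simpa only [List.any_eq_true, not_exists] using he
        have h1 : vs.filter (fun s => s != "NOT_EVALUATED") = [] := by
          simp only [List.filter_eq_nil_iff]
          intro x hx hc
          exact he' x ⟨hx, hc⟩
        simp [hf, hu, he, h1]
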